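-- pv_equiv track=rewrite | github.com/Keerthanareddy95/Genetic-Algorithm-Works | Auto TimeTable Generator/algo.py | format_timetable
-- ===== SOURCE A (Python) =====
-- from typing import List, Tuple
--
-- DAYS = ["Monday", "Tuesday", "Wednesday", "Thursday", "Friday"]
--
-- TIMES = ["9:00-9:50", "10:00-10:50", "11:00-11:50", "12:00-12:50", "1:40-2:30", "2:40-3:30", "3:40-4:30"]
--
-- Genome = List[Tuple[str, str, str, str, str, str]]
--
-- def format_timetable(genome: Genome, section: str) -> str:
--     timetable = f"Timetable for Section {section}\n"
--     section_genome = [entry for entry in genome if entry[2] == section]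
--
--     for day in DAYS:
--         timetable += f"{day}\n"
--         day_genome = [entry for entry in section_genome if entry[0] == day]
--         for time in TIMES:
--             entry = next((entry for entry in day_genome if entry[1] == time), None)
--             if entry:
--                 timetable += f"{time}: {entry[3]} with {entry[4]} in {entry[5]}\n"
--             else:
--                 timetable += f"{time}: Free\n"
--         timetable += "\n"
--
--     return timetable
-- ===== SOURCE B (Python) =====
-- DAYS = ["Monday", "Tuesday", "Wednesday", "Thursday", "Friday"]
--
-- TIMES = ["9:00-9:50", "10:00-10:50", "11:00-11:50", "12:00-12:50", "1:40-2:30", "2:40-3:30", "3:40-4:30"]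
--
-- def format_timetable(genome, section):
--     # One pass over genome: index the section's entries by (day, time), keeping
--     # the first occurrence; then emit the fixed grid with direct lookups.
--     table = {}
--     for entry in genome:
--         if entry[2] == section:
--             table.setdefault((entry[0], entry[1]), entry)
--     out = f"Timetable for Section {section}\n"
--     for day in DAYS:
--         out += f"{day}\n"
--         for time in TIMES:
--             entry = table.get((day, time))
--             if entry:
--                 out += f"{time}: {entry[3]} with {entry[4]} in {entry[5]}\n"
--             else:
--                 out += f"{time}: Free\n"
--         out += "\n"
--     return out
-- ===== Notes on version B (the rewrite author's own statement) =====
-- stated objective: alternative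
-- what changed: B replaces A's per-day list filtering and per-cell linear next() scan with a single pass that indexes the section's entries in a dict keyed by (day, time) (setdefault keeps the first match), so each grid cell is one dict lookup.
import Mathlib
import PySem

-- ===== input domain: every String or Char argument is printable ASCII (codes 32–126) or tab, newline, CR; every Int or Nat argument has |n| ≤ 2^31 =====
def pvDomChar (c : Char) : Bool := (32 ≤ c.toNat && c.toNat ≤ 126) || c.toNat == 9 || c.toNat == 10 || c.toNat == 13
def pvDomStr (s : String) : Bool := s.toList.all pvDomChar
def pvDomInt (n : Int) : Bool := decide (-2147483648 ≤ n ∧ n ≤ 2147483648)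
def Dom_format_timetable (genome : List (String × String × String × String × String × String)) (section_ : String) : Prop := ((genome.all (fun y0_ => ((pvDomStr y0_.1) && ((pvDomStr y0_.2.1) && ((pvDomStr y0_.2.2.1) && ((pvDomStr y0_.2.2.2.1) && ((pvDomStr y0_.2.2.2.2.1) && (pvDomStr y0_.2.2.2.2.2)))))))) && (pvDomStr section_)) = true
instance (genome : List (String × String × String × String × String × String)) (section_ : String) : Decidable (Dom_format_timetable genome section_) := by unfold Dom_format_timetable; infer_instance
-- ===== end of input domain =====

-- B builds a (day, time) → entry dict in one pass (setdefault keeps the first match),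
-- replacing A's per-day filtering and per-cell linear scan.

def pyDAYS : List String := ["Monday", "Tuesday", "Wednesday", "Thursday", "Friday"]

def pyTIMES : List String := ["9:00-9:50", "10:00-10:50", "11:00-11:50", "12:00-12:50", "1:40-2:30", "2:40-3:30", "3:40-4:30"]

-- ===== PORT A =====
def format_timetable (genome : List (String × String × String × String × String × String)) (section_ : String) : String :=
  let timetable := "Timetable for Section " ++ section_ ++ "\n"
  let section_genome := genome.filter (fun e => e.2.2.1 == section_)
  pyDAYS.foldl (fun tt day =>
    let tt := tt ++ day ++ "\n"
    let day_genome := section_genome.filter (fun e => e.1 == day)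
    let tt := pyTIMES.foldl (fun tt time =>
      match day_genome.find? (fun e => e.2.1 == time) with
      | some e => tt ++ time ++ ": " ++ e.2.2.2.1 ++ " with " ++ e.2.2.2.2.1 ++ " in " ++ e.2.2.2.2.2 ++ "\n"
      | none => tt ++ time ++ ": Free\n") tt
    tt ++ "\n") timetable

-- ===== PORT B =====
def format_timetable_alt (genome : List (String × String × String × String × String × String)) (section_ : String) : String :=
  let table := genome.foldl (fun d e =>
      if e.2.2.1 == section_ then d.setdefault (e.1, e.2.1) e else d)
    (PySem.Dict.empty : PySem.Dict (String × String) (String × String × String × String × String × String))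
  let out := "Timetable for Section " ++ section_ ++ "\n"
  pyDAYS.foldl (fun out day =>
    let out := out ++ day ++ "\n"
    let out := pyTIMES.foldl (fun out time =>
      match table.get? (day, time) with
      | some e => out ++ time ++ ": " ++ e.2.2.2.1 ++ " with " ++ e.2.2.2.2.1 ++ " in " ++ e.2.2.2.2.2 ++ "\n"
      | none => out ++ time ++ ": Free\n") out
    out ++ "\n") out

-- ===== PRECONDITION & SPEC =====
def Spec_format_timetable (genome : List (String × String × String × String × String × String)) (section_ : String) (out : String) : Prop := out = format_timetable_alt genome section_
instance (genome : List (String × String × String × String × String × String)) (section_ : String) (out : String) : Decidable (Spec_format_timetable genome section_ out) := by unfold Spec_format_timetable; infer_instance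

-- ===== CLAIM (what is proved, stated in full; the proofs are below) =====
def Claim_equal_format_timetable : Prop := ∀ (genome : List (String × String × String × String × String × String)) (section_ : String), Dom_format_timetable genome section_ → Spec_format_timetable genome section_ (format_timetable genome section_)

-- ===== LEMMAS AND PROOFS =====

-- The dict built by B, looked up at (day, time), yields the first entry of d for that key,
-- or else the first genome entry matching section, day and time — exactly A's nested scans.
lemma pv_table_get (genome : List (String × String × String × String × String × String))
    (section_ day time : String)
    (d : PySem.Dict (String × String) (String × String × String × String × String × String)) :
    (genome.foldl (fun d e =>
        if e.2.2.1 == section_ then d.setdefault (e.1, e.2.1) e else d) d).get? (day, time)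
    = (d.get? (day, time)).or
        (((genome.filter (fun e => e.2.2.1 == section_)).filter (fun e => e.1 == day)).find?
          (fun e => e.2.1 == time)) := by
  induction genome generalizing d with
  | nil => simp
  | cons e rest ih =>
    simp only [List.foldl_cons, List.filter_cons]
    by_cases hs : e.2.2.1 = section_
    · rw [if_pos (by simp [hs]), if_pos (by simp [hs])]
      rw [ih]
      by_cases hc : d.contains (e.1, e.2.1) = true
      · rw [PySem.Dict.setdefault_of_contains _ _ hc]
        by_cases hk : (e.1, e.2.1) = (day, time)
        · obtain ⟨v, hv⟩ : ∃ v, d.get? (day, time) = some v := by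
            rw [← hk]
            rcases h' : d.get? (e.1, e.2.1) with _ | v
            · rw [PySem.Dict.contains_eq_isSome_get?, h'] at hc; simp at hc
            · exact ⟨v, rfl⟩
          simp [hv, Option.or]
        · by_cases h1 : e.1 = day
          · have h2 : ¬ (e.2.1 = time) := fun h2 => hk (by rw [h1, h2])
            simp [h1, h2]
          · simp [h1]
      · rw [PySem.Dict.setdefault_of_not_contains _ _ (by simpa using hc)]
        rw [PySem.Dict.get?_insert]
        by_cases hk : (day, time) = (e.1, e.2.1)
        · have hnone : d.get? (day, time) = none := by
            rw [hk]
            rcases h' : d.get? (e.1, e.2.1) with _ | v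
            · rfl
            · rw [PySem.Dict.contains_eq_isSome_get?, h'] at hc; simp at hc
          have h1 : e.1 = day := congrArg Prod.fst hk.symm
          have h2 : e.2.1 = time := congrArg Prod.snd hk.symm
          rw [if_pos hk, hnone]
          simp [h1, h2, Option.or]
        · rw [if_neg hk]
          by_cases h1 : e.1 = day
          · have h2 : ¬ (e.2.1 = time) := fun h2 => hk (by rw [h1, h2])
            simp [h1, h2]
          · simp [h1]
    · rw [if_neg (by simp [hs]), if_neg (by simp [hs])]
      exact ih d

theorem pv_main (genome : List (String × String × String × String × String × String))
    (section_ : String) :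
    format_timetable genome section_ = format_timetable_alt genome section_ := by
  unfold format_timetable format_timetable_alt
  simp only [pv_table_get, PySem.Dict.get?_empty, Option.none_or]

-- ===== VERDICT (by name: the statement is the Claim_ definition above) =====
theorem format_timetable_spec : Claim_equal_format_timetable := by
  intro genome section_ _
  exact pv_main genome section_
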